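-- pv_equiv track=rewrite | github.com/estrella-tech/sparkplug-plugin | scripts/mass_outreach.py | pick_best_apex_contact
-- ===== SOURCE A (Python) =====
-- PREFERRED_TITLES = {"gm", "general manager", "buyer", "retail buyer", "ceo",
--                     "coo", "owner", "manager", "director", "inventory lead"}
--
-- AVOID_NAMES = {"accounting", "ap", "billing", "bookkeeping", "bookkeeper"}
--
-- def pick_best_apex_contact(contacts: list) -> dict:
--     """Pick the best contact from Apex — prefer titled/named people over generic."""
--     # First pass: anyone with a preferred title
--     for c in contacts:
--         title = c.get("title", "").strip().lower()
--         if title and any(t in title for t in PREFERRED_TITLES):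
--             return c
--     # Second pass: named person (not ACCOUNTING, AP, etc.)
--     for c in contacts:
--         name = c.get("name", "").strip().upper()
--         if name and name not in {n.upper() for n in AVOID_NAMES}:
--             return c
--     # Fallback: first contact
--     return contacts[0] if contacts else None
-- ===== SOURCE B (Python) =====
-- PREFERRED_TITLES = {"gm", "general manager", "buyer", "retail buyer", "ceo",
--                     "coo", "owner", "manager", "director", "inventory lead"}
--
-- AVOID_NAMES = {"accounting", "ap", "billing", "bookkeeping", "bookkeeper"}
--
--
-- def pick_best_apex_contact(contacts: list) -> dict:
--     """Single pass: remember the first titled and the first named contact."""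
--     avoid = {n.upper() for n in AVOID_NAMES}
--     first_titled = None
--     first_named = None
--     for c in contacts:
--         if first_titled is None:
--             title = c.get("title", "").strip().lower()
--             if title and any(t in title for t in PREFERRED_TITLES):
--                 first_titled = c
--         if first_named is None:
--             name = c.get("name", "").strip().upper()
--             if name and name not in avoid:
--                 first_named = c
--     if first_titled is not None:
--         return first_titled
--     if first_named is not None:
--         return first_named
--     return contacts[0] if contacts else None
-- ===== Notes on version B (the rewrite author's own statement) =====
-- stated objective: alternative
-- what changed: Replaces A's two sequential full scans (titled pass, then named pass) by one single pass that maintains first_titled/first_named accumulators and combines them after the loop.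
import Mathlib
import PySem

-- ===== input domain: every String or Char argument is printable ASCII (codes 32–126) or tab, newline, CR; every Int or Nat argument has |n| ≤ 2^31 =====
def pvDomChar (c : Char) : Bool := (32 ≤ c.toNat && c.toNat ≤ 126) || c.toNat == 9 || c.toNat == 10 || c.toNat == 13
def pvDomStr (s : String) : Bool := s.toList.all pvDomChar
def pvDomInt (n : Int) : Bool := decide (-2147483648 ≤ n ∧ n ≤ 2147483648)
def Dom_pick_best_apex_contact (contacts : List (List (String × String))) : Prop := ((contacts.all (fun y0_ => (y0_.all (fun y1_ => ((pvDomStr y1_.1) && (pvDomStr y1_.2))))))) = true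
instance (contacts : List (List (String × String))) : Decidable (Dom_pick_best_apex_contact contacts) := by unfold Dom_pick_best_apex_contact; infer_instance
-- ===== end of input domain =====

-- B replaces A's two sequential scans over the contacts by one single pass keeping
-- first_titled/first_named accumulators (alternative decomposition, same cost).


-- ===== PORT A =====
def PREFERRED_TITLES : List String :=
  ["gm", "general manager", "buyer", "retail buyer", "ceo",
   "coo", "owner", "manager", "director", "inventory lead"]

def AVOID_NAMES : List String :=
  ["accounting", "ap", "billing", "bookkeeping", "bookkeeper"]

-- c.get("title", "").strip().lower();  'title and any(t in title for t in PREFERRED_TITLES)'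
def hasPreferredTitle (c : List (String × String)) : Bool :=
  let title := PySem.Str.lower (PySem.Str.strip ((PySem.Dict.mk c).getD "title" ""))
  (title != "") && PREFERRED_TITLES.any (fun t => PySem.Str.isIn t title)

-- c.get("name", "").strip().upper();  'name and name not in {n.upper() for n in AVOID_NAMES}'
def hasUsableName (c : List (String × String)) : Bool :=
  let name := PySem.Str.upper (PySem.Str.strip ((PySem.Dict.mk c).getD "name" ""))
  (name != "") && !((AVOID_NAMES.map PySem.Str.upper).contains name)

-- first pass: return the first contact with a preferred title
def loopTitled : List (List (String × String)) → Option (List (String × String))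
  | [] => none
  | c :: rest => if hasPreferredTitle c then some c else loopTitled rest

-- second pass: return the first contact with a usable name
def loopNamed : List (List (String × String)) → Option (List (String × String))
  | [] => none
  | c :: rest => if hasUsableName c then some c else loopNamed rest

def pick_best_apex_contact (contacts : List (List (String × String))) : Option (List (String × String)) :=
  match loopTitled contacts with
  | some c => some c
  | none =>
    match loopNamed contacts with
    | some c => some c
    | none =>
      match contacts with
      | [] => none
      | c :: _ => some c

-- ===== PORT B =====
-- one loop iteration of Source B: fill first_titled / first_named if still unset
def stepB (s : Option (List (String × String)) × Option (List (String × String)))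
    (c : List (String × String)) :
    Option (List (String × String)) × Option (List (String × String)) :=
  let ft := if s.1.isNone && hasPreferredTitle c then some c else s.1
  let fn := if s.2.isNone && hasUsableName c then some c else s.2
  (ft, fn)

def pick_best_apex_contact_alt (contacts : List (List (String × String))) : Option (List (String × String)) :=
  let s := contacts.foldl stepB (none, none)
  match s.1 with
  | some c => some c
  | none =>
    match s.2 with
    | some c => some c
    | none =>
      match contacts with
      | [] => none
      | c :: _ => some c

-- ===== PRECONDITION & SPEC =====
def Spec_pick_best_apex_contact (contacts : List (List (String × String))) (out : Option (List (String × String))) : Prop := out = pick_best_apex_contact_alt contacts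
instance (contacts : List (List (String × String))) (out : Option (List (String × String))) : Decidable (Spec_pick_best_apex_contact contacts out) := by unfold Spec_pick_best_apex_contact; infer_instance

-- ===== CLAIM (what is proved, stated in full; the proofs are below) =====
def Claim_equal_pick_best_apex_contact : Prop := ∀ (contacts : List (List (String × String))), Dom_pick_best_apex_contact contacts → Spec_pick_best_apex_contact contacts (pick_best_apex_contact contacts)

-- ===== LEMMAS AND PROOFS =====

-- the single pass computes (first titled, first named) of A's two separate passes
theorem foldB_eq (l : List (List (String × String)))
    (ft fn : Option (List (String × String))) :
    l.foldl stepB (ft, fn) = (ft.or (loopTitled l), fn.or (loopNamed l)) := by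
  induction l generalizing ft fn with
  | nil => simp [loopTitled, loopNamed]
  | cons c rest ih =>
    simp only [List.foldl_cons, stepB, ih, loopTitled, loopNamed]
    cases ft <;> cases fn <;> by_cases h1 : hasPreferredTitle c <;>
      by_cases h2 : hasUsableName c <;> simp [h1, h2]

-- ===== VERDICT (by name: the statement is the Claim_ definition above) =====
theorem pick_best_apex_contact_spec : Claim_equal_pick_best_apex_contact := by
  intro contacts _
  unfold Spec_pick_best_apex_contact pick_best_apex_contact pick_best_apex_contact_alt
  rw [foldB_eq]
  cases loopTitled contacts <;> cases loopNamed contacts <;> simp [Option.or]
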